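-- pv_equiv track=rewrite | github.com/andynet/manber_myers | src/bwt.py | construct_first
-- ===== SOURCE A (Python) =====
-- def get_alphabet(txt):
--     return sorted(set(txt))
--
-- def construct_first(bwt):
--     alphabet = get_alphabet(bwt)
--     F = dict()
--     for c in alphabet:
--         F[c] = 0
--     for c in bwt:
--         F[c] += 1
--
--     F_txt = ""
--     for c in alphabet:
--         F_txt += c * F[c]
--     return F, F_txt
-- ===== SOURCE B (Python) =====
-- def construct_first(bwt):
--     F_txt = "".join(sorted(bwt))
--     F = {}
--     for c in F_txt:
--         F[c] = F.get(c, 0) + 1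
--     return F, F_txt
-- ===== Notes on version B (the rewrite author's own statement) =====
-- stated objective: simpler
-- what changed: B sorts the whole string once (the sorted run-length expansion equals the sorted string) and builds the counts in one pass over it via dict.get, removing A's alphabet construction, zero-init loop, count loop and expansion loop.
import Mathlib
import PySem

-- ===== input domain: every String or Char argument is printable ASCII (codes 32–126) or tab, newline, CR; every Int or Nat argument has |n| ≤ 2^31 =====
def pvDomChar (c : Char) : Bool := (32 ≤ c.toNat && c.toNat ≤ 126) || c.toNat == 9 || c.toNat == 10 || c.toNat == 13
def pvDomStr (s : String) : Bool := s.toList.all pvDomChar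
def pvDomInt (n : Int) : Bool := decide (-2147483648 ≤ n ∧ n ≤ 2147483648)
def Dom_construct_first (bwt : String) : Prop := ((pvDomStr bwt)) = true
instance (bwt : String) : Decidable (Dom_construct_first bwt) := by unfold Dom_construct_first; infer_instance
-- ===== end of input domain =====

-- B replaces A's alphabet/zero-init/count/expansion loops by one sort of the whole string
-- plus a single counting pass over it (objective: simpler).
-- Python iterates a str as 1-char strings; both ports model those as Char and convert the
-- dict keys to 1-char Strings at the very end (exact on the input domain).

-- ===== PORT A =====
def construct_first (bwt : String) : (List (String × Int)) × String :=
  let cs := bwt.toList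
  let alphabet := PySem.List.sorted (PySem.Set.ofList cs) (fun x => x) false
  let F0 : PySem.Dict Char Int := alphabet.foldl (fun d c => d.insert c 0) PySem.Dict.empty
  let F : PySem.Dict Char Int := cs.foldl (fun d c => d.modify c 0 (· + 1)) F0
  let F_txt : List Char := alphabet.foldl (fun acc c => acc ++ PySem.List.pyRepeat [c] (F.getD c 0)) []
  (F.items.map (fun p => (String.ofList [p.1], p.2)), String.ofList F_txt)

-- ===== PORT B =====
def construct_first_alt (bwt : String) : (List (String × Int)) × String :=
  let s := PySem.List.sorted bwt.toList (fun x => x) false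
  let F : PySem.Dict Char Int := s.foldl (fun d c => d.insert c (d.getD c 0 + 1)) PySem.Dict.empty
  (F.items.map (fun p => (String.ofList [p.1], p.2)), String.ofList s)

-- ===== PRECONDITION & SPEC =====
def Spec_construct_first (bwt : String) (out : (List (String × Int)) × String) : Prop := out = construct_first_alt bwt
instance (bwt : String) (out : (List (String × Int)) × String) : Decidable (Spec_construct_first bwt out) := by unfold Spec_construct_first; infer_instance

-- ===== CLAIM (what is proved, stated in full; the proofs are below) =====
def Claim_equal_construct_first : Prop := ∀ (bwt : String), Dom_construct_first bwt → Spec_construct_first bwt (construct_first bwt)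

-- ===== LEMMAS AND PROOFS =====

-- PySem.Set.ofList xs is a sublist of xs.
theorem pv_foldl_add_sublist {α : Type} [BEq α] (xs : List α) :
    ∀ (s ys : List α), s.Sublist ys → (xs.foldl PySem.Set.add s).Sublist (ys ++ xs) := by
  induction xs with
  | nil => intro s ys h; simpa using h
  | cons x xs ih =>
    intro s ys h
    simp only [List.foldl_cons]
    have h2 : (PySem.Set.add s x).Sublist (ys ++ [x]) := by
      unfold PySem.Set.add
      split
      · exact h.trans (List.sublist_append_left ys [x])
      · exact h.append (List.Sublist.refl [x])
    have := ih (PySem.Set.add s x) (ys ++ [x]) h2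
    simpa using this

theorem pv_ofList_sublist {α : Type} [BEq α] (xs : List α) :
    (PySem.Set.ofList xs).Sublist xs := by
  have := pv_foldl_add_sublist xs PySem.Set.empty [] (List.Sublist.refl [])
  simpa [PySem.Set.ofList, PySem.Set.empty] using this

-- ofList of a ≤-sorted list is strictly increasing.
theorem pv_ofList_sorted_pairwise_lt (cs : List Char) :
    (PySem.Set.ofList (PySem.List.sorted cs (fun x => x) false)).Pairwise (· < ·) := by
  have hle : (PySem.Set.ofList (PySem.List.sorted cs (fun x => x) false)).Pairwise (· ≤ ·) :=
    (PySem.List.sorted_pairwise cs (fun x => x)).sublist (pv_ofList_sublist _)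
  have hne : (PySem.Set.ofList (PySem.List.sorted cs (fun x => x) false)).Pairwise (· ≠ ·) :=
    PySem.Set.nodup_ofList _
  exact (hle.and hne).imp (fun h => lt_of_le_of_ne h.1 h.2)

-- the sorted distinct alphabet of cs equals ofList of the sorted cs
theorem pv_alphabet_eq (cs : List Char) :
    PySem.List.sorted (PySem.Set.ofList cs) (fun x => x) false
      = PySem.Set.ofList (PySem.List.sorted cs (fun x => x) false) := by
  apply PySem.List.sorted_eq_of_perm_of_pairwise_lt
  · apply (List.perm_ext_iff_of_nodup (PySem.Set.nodup_ofList _) (PySem.Set.nodup_ofList _)).mpr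
    intro a
    simp [PySem.Set.mem_ofList, PySem.List.mem_sorted]
  · exact pv_ofList_sorted_pairwise_lt cs

-- counting the occurrences in the flatMap of replicate-blocks
theorem pv_count_flatMap_replicate_aux (al : List Char) (cs : List Char) (hnd : al.Nodup)
    (x : Char) :
    (al.flatMap (fun c => List.replicate (cs.count c) c)).count x
      = if x ∈ al then cs.count x else 0 := by
  induction al with
  | nil => simp
  | cons a al ih =>
    simp only [List.flatMap_cons, List.count_append, List.count_replicate,
      ih hnd.of_cons, List.mem_cons]
    by_cases hxa : x = a
    · subst hxa
      have : x ∉ al := by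
        intro h; exact (List.rel_of_pairwise_cons hnd h) rfl
      simp [this]
    · simp [hxa, Ne.symm hxa, beq_iff_eq]

theorem pv_count_flatMap_replicate (al : List Char) (cs : List Char) (hnd : al.Nodup)
    (hmem : ∀ x, x ∈ al ↔ x ∈ cs) (x : Char) :
    (al.flatMap (fun c => List.replicate (cs.count c) c)).count x = cs.count x := by
  rw [pv_count_flatMap_replicate_aux al cs hnd x]
  by_cases hx : x ∈ al
  · simp [hx]
  · have : x ∉ cs := fun h => hx ((hmem x).mpr h)
    simp [hx, List.count_eq_zero_of_not_mem this]

theorem pv_flatMap_perm (cs : List Char) :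
    ((PySem.List.sorted (PySem.Set.ofList cs) (fun x => x) false).flatMap
      (fun c => List.replicate (cs.count c) c)).Perm cs := by
  apply List.perm_iff_count.mpr
  intro x
  apply pv_count_flatMap_replicate _ _ ((PySem.List.sorted_perm _ _ _).nodup_iff.mpr (PySem.Set.nodup_ofList _))
  intro y; simp [PySem.List.mem_sorted, PySem.Set.mem_ofList]

theorem pv_flatMap_pairwise (al : List Char) (f : Char → Nat) (h : al.Pairwise (· < ·)) :
    (al.flatMap (fun c => List.replicate (f c) c)).Pairwise (· ≤ ·) := by
  induction al with
  | nil => simp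
  | cons a al ih =>
    simp only [List.flatMap_cons]
    apply List.pairwise_append.mpr
    refine ⟨List.pairwise_replicate.mpr (by simp), ih h.of_cons, ?_⟩
    intro x hx y hy
    obtain ⟨c, hc, hyc⟩ := List.mem_flatMap.mp hy
    have hxa := List.eq_of_mem_replicate hx
    have hyc' := List.eq_of_mem_replicate hyc
    subst hxa hyc'
    exact le_of_lt (List.rel_of_pairwise_cons h hc)

-- A's expansion of the sorted alphabet by counts equals the fully sorted string
theorem pv_expansion_eq (cs : List Char) :
    (PySem.List.sorted (PySem.Set.ofList cs) (fun x => x) false).flatMap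
      (fun c => List.replicate (cs.count c) c)
      = PySem.List.sorted cs (fun x => x) false := by
  symm
  apply PySem.List.sorted_id_eq_of_perm_of_pairwise
  · exact pv_flatMap_perm cs
  · exact pv_flatMap_pairwise _ _ (PySem.List.sorted_ofList_pairwise_lt cs)

-- zero-initialisation: items of the first loop's dict
theorem pv_items_foldl_insert_zero (al : List Char) (d : PySem.Dict Char Int)
    (hnd : al.Nodup) (hfresh : ∀ x ∈ al, x ∉ d.keys) :
    (al.foldl (fun d c => d.insert c 0) d).items = d.items ++ al.map (fun c => (c, (0 : Int))) := by
  induction al generalizing d with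
  | nil => simp
  | cons a al ih =>
    have hfa : d.contains a = false := by
      rw [Bool.eq_false_iff]
      intro hc
      apply hfresh a (by simp)
      obtain ⟨p, hp, hpa⟩ := List.any_eq_true.mp hc
      exact (beq_iff_eq.mp hpa) ▸ (List.mem_map_of_mem hp)
    have hins : (d.insert a 0).items = d.items ++ [(a, (0 : Int))] := by
      simp [PySem.Dict.insert, hfa]
    simp only [List.foldl_cons]
    rw [ih (d.insert a 0) hnd.of_cons ?fresh]
    · rw [hins]; simp
    case fresh =>
      intro x hx
      have hxd : x ∉ d.keys := hfresh x (by simp [hx])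
      have hxa : x ≠ a := fun h => (List.rel_of_pairwise_cons hnd hx) h.symm
      simp only [PySem.Dict.keys] at hxd ⊢
      rw [hins, List.map_append, List.mem_append]
      rintro (h | h)
      · exact hxd h
      · simp at h; exact hxa h

-- counting loop over present keys updates values in place
theorem pv_items_foldl_modify (cs : List Char) (d : PySem.Dict Char Int)
    (hnd : d.keys.Nodup) (hmem : ∀ x ∈ cs, x ∈ d.keys) :
    (cs.foldl (fun d c => d.modify c 0 (· + 1)) d).items
      = d.items.map (fun p => (p.1, p.2 + (cs.count p.1 : Int))) := by
  induction cs generalizing d with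
  | nil =>
    simp
  | cons c cs ih =>
    have hcmem : c ∈ d.keys := hmem c (by simp)
    have hcont : d.contains c = true := by
      obtain ⟨p, hp, hpc⟩ := List.mem_map.mp hcmem
      exact List.any_eq_true.mpr ⟨p, hp, by simp [hpc]⟩
    have hitems : (d.modify c 0 (· + 1)).items
        = d.items.map (fun p => if p.1 = c then (p.1, p.2 + 1) else p) := by
      simp only [PySem.Dict.modify, PySem.Dict.insert, hcont, if_true]
      apply List.map_congr_left
      intro p hp
      by_cases hpc : p.1 = c
      · have : d.get? c = some p.2 := by
          apply PySem.Dict.get?_of_mem_items d (k := c) (v := p.2) _ hnd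
          · exact hpc ▸ hp
        simp [hpc, PySem.Dict.getD, this]
      · simp [hpc]
    have hkeys : (d.modify c 0 (· + 1)).keys = d.keys := by
      simp only [PySem.Dict.keys, hitems, List.map_map]
      apply List.map_congr_left
      intro p hp
      by_cases hpc : p.1 = c <;> simp [hpc]
    simp only [List.foldl_cons]
    rw [ih (d.modify c 0 (· + 1)) (by rw [hkeys]; exact hnd)
      (fun x hx => by rw [hkeys]; exact hmem x (by simp [hx]))]
    rw [hitems, List.map_map]
    apply List.map_congr_left
    intro p hp
    by_cases hpc : p.1 = c
    · simp only [Function.comp_apply, hpc, List.count_cons, beq_iff_eq,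
        Prod.mk.injEq]
      exact ⟨rfl, by push_cast; ring⟩
    · have hcp : ¬ c = p.1 := fun h => hpc h.symm
      simp [hpc, hcp]

-- ===== VERDICT (by name: the statement is the Claim_ definition above) =====
-- getD is 0 on a dict whose items all carry value 0
theorem pv_getD_map_zero (l : List Char) (c : Char) :
    (PySem.Dict.mk (l.map (fun k => (k, (0 : Int))))).getD c 0 = 0 := by
  simp only [PySem.Dict.getD, PySem.Dict.get?]
  induction l with
  | nil => simp
  | cons a l ih =>
    by_cases hac : a = c
    · simp [hac]
    · simpa [List.find?, hac] using ih

theorem construct_first_spec : Claim_equal_construct_first := by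
  intro bwt _
  simp only [Spec_construct_first, construct_first, construct_first_alt]
  set cs := bwt.toList with hcs
  set al := PySem.List.sorted (PySem.Set.ofList cs) (fun x => x) false with hal
  set S := PySem.List.sorted cs (fun x => x) false with hS
  have hndal : al.Nodup := by
    rw [hal]
    exact (PySem.List.sorted_perm _ _ _).nodup_iff.mpr (PySem.Set.nodup_ofList _)
  -- the zero-initialised dict
  have hF0 : (al.foldl (fun d c => d.insert c (0 : Int)) PySem.Dict.empty).items
      = al.map (fun c => (c, (0 : Int))) := by
    rw [pv_items_foldl_insert_zero al PySem.Dict.empty hndal (by simp [PySem.Dict.empty, PySem.Dict.keys])]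
    simp [PySem.Dict.empty]
  set F0 := al.foldl (fun d c => d.insert c (0 : Int)) PySem.Dict.empty with hF0def
  have hF0keys : F0.keys = al := by
    simp only [PySem.Dict.keys, hF0, List.map_map]
    simp [Function.comp_def]
  -- the counted dict
  have hFitems : (cs.foldl (fun d c => d.modify c 0 (· + 1)) F0).items
      = al.map (fun c => (c, (cs.count c : Int))) := by
    rw [pv_items_foldl_modify cs F0 (by rw [hF0keys]; exact hndal)
      (fun x hx => by
        rw [hF0keys, hal, PySem.List.mem_sorted]
        exact (PySem.Set.mem_ofList cs x).mpr hx)]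
    rw [hF0, List.map_map]
    simp
  set F := cs.foldl (fun d c => d.modify c 0 (· + 1)) F0 with hFdef
  have hFgetD : ∀ c, F.getD c 0 = (cs.count c : Int) := by
    intro c
    rw [hFdef, PySem.Dict.getD_foldl_modify_add_one]
    have : F0.getD c 0 = 0 := by
      have : F0 = PySem.Dict.mk (al.map (fun k => (k, (0 : Int)))) := by
        cases hF0eq : F0 with
        | mk items => simpa [hF0eq] using hF0
      rw [this]; exact pv_getD_map_zero al c
    rw [this]; ring
  -- the F_txt loop
  have hFtxt : al.foldl (fun acc c => acc ++ PySem.List.pyRepeat [c] (F.getD c 0)) [] = S := by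
    rw [PySem.List.foldl_append_eq_flatMap]
    simp only [List.nil_append]
    have : al.flatMap (fun c => PySem.List.pyRepeat [c] (F.getD c 0))
        = al.flatMap (fun c => List.replicate (cs.count c) c) := by
      apply List.flatMap_congr
      intro c _
      rw [hFgetD c, PySem.List.pyRepeat_singleton, Int.toNat_natCast]
    rw [this, hal, pv_expansion_eq]
  -- the B-side dict
  have hB : (S.foldl (fun d c => d.insert c (d.getD c 0 + 1)) PySem.Dict.empty).items
      = al.map (fun c => (c, (cs.count c : Int))) := by
    rw [PySem.Dict.foldl_insert_getD_add_one_eq_counter, PySem.Dict.items_counter]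
    rw [hS, ← pv_alphabet_eq, ← hal]
    apply List.map_congr_left
    intro c _
    rw [(PySem.List.sorted_perm cs (fun x => x) false).count_eq c]
  rw [hFitems, hFtxt, hB]
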